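-- pv_equiv track=rewrite | github.com/Vishu82828/React | Project1/src/mycomp/try.py | solve
-- ===== SOURCE A (Python) =====
-- def solve(s):
--     result = []
--
--     for i in range(len(s)):
--         char = s[i]
--
--         if i % 2 == 1:
--             if char == 'y':
--                 result.append('B')
--             elif char == 'z':
--                 result.append('C')
--             else:
--                 new_char = chr(((ord(char.lower()) - ord('a') + 3) % 26) + ord('a')).upper()
--                 result.append(new_char)
--         else:
--             result.append(char)
--
--     return ''.join(result)
-- ===== SOURCE B (Python) =====
-- def solve(s):
--     # one pass consuming the characters two at a time: keep the first of each
--     # pair, shift the second; no index/parity bookkeeping, no y/z special cases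
--     it = iter(s)
--     out = []
--     for a in it:
--         out.append(a)
--         b = next(it, '')
--         if b:
--             out.append(chr(((ord(b.lower()) - 97 + 3) % 26) + 97).upper())
--     return ''.join(out)
-- ===== Notes on version B (the rewrite author's own statement) =====
-- stated objective: simpler
-- what changed: B consumes the string two characters at a time (keep one, shift one) instead of A's indexed loop with a parity test on every position, and drops A's redundant wraparound special cases since the modular shift formula already covers them.
import Mathlib
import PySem

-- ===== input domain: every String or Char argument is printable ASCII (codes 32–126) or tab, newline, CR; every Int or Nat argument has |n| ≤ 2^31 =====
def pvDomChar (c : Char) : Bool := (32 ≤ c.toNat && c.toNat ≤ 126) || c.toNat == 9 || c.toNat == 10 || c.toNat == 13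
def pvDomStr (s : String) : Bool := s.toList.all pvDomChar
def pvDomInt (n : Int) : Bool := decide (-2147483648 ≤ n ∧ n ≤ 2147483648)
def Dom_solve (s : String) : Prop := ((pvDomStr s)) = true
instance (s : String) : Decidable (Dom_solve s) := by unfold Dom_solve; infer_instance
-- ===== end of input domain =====

-- B keeps each even-index character and shifts the next one in the same step,
-- with no index/parity bookkeeping and no y/z special cases (simpler; same cost).

-- ===== PORT A =====
-- chr(((ord(char.lower()) - ord('a') + 3) % 26) + ord('a')).upper()
def shiftA (c : Char) : Char :=
  PySem.Chars.upperChar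
    (Char.ofNat ((PySem.Int.mod (((PySem.Chars.lowerChar c).toNat : Int) - 97 + 3) 26 + 97).toNat))

-- the body of A's loop over i (the if/elif/else appending to `result`)
def stepA (acc : List Char) (p : Int × Char) : List Char :=
  if PySem.Int.mod p.1 2 = 1 then
    if p.2 = 'y' then acc ++ ['B']
    else if p.2 = 'z' then acc ++ ['C']
    else acc ++ [shiftA p.2]
  else acc ++ [p.2]

-- A: loop over indices, parity test, y/z special-cased, accumulate into `result`.
def solve (s : String) : String :=
  let result := (PySem.List.enumerate s.toList 0).foldl stepA []
  String.ofList result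

-- ===== PORT B =====
def shiftB (c : Char) : Char :=
  PySem.Chars.upperChar
    (Char.ofNat ((PySem.Int.mod (((PySem.Chars.lowerChar c).toNat : Int) - 97 + 3) 26 + 97).toNat))

-- B: consume two characters per step (the `for a in it` + `next(it, '')` loop of Source B).
def solveAltCore : List Char → List Char
  | [] => []
  | [a] => [a]
  | a :: b :: rest => a :: shiftB b :: solveAltCore rest

def solve_alt (s : String) : String := String.ofList (solveAltCore s.toList)

-- ===== PRECONDITION & SPEC =====
def Spec_solve (s : String) (out : String) : Prop := out = solve_alt s
instance (s : String) (out : String) : Decidable (Spec_solve s out) := by unfold Spec_solve; infer_instance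

-- ===== CLAIM (what is proved, stated in full; the proofs are below) =====
def Claim_equal_solve : Prop := ∀ (s : String), Dom_solve s → Spec_solve s (solve s)

-- ===== LEMMAS AND PROOFS =====

theorem shiftA_eq_shiftB (c : Char) : shiftA c = shiftB c := rfl

theorem mod_two_even (n : Nat) : PySem.Int.mod ((2 * n : Nat) : Int) 2 ≠ 1 := by
  simp [PySem.Int.mod, Int.fmod_eq_emod]

theorem mod_two_odd (n : Nat) : PySem.Int.mod (((2 * n : Nat) : Int) + 1) 2 = 1 := by
  simp [PySem.Int.mod, Int.fmod_eq_emod]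

theorem stepA_odd (acc : List Char) (n : Nat) (c : Char) :
    stepA acc (((2 * n : Nat) : Int) + 1, c) = acc ++ [shiftB c] := by
  unfold stepA
  rw [if_pos (mod_two_odd n)]
  by_cases hy : c = 'y'
  · subst hy; simp [shiftB]; decide
  · by_cases hz : c = 'z'
    · subst hz; simp [hy, shiftB]; decide
    · simp [hy, hz, shiftA_eq_shiftB]

theorem stepA_even (acc : List Char) (n : Nat) (c : Char) :
    stepA acc (((2 * n : Nat) : Int), c) = acc ++ [c] := by
  unfold stepA
  rw [if_neg (mod_two_even n)]

theorem foldA_core (cs : List Char) :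
    ∀ (n : Nat) (acc : List Char),
      (PySem.List.enumerate cs ((2 * n : Nat) : Int)).foldl stepA acc = acc ++ solveAltCore cs := by
  induction cs using solveAltCore.induct with
  | case1 => intro n acc; simp [PySem.List.enumerate_nil, solveAltCore]
  | case2 a =>
      intro n acc
      rw [PySem.List.enumerate_cons, PySem.List.enumerate_nil]
      simp only [List.foldl]
      rw [stepA_even]
      simp [solveAltCore]
  | case3 a b rest ih =>
      intro n acc
      rw [PySem.List.enumerate_cons, PySem.List.enumerate_cons]
      have h2 : ((2 * n : Nat) : Int) + 1 + 1 = ((2 * (n + 1) : Nat) : Int) := by push_cast; ring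
      simp only [List.foldl, stepA_even, stepA_odd, h2, ih (n + 1)]
      simp [solveAltCore]

-- ===== VERDICT (by name: the statement is the Claim_ definition above) =====
theorem solve_spec : Claim_equal_solve := by
  intro s _
  show solve s = solve_alt s
  unfold solve solve_alt
  have h := foldA_core s.toList 0 []
  simp only [Nat.mul_zero, Nat.cast_zero] at h
  rw [h, List.nil_append]
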